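-- pv_equiv track=rewrite | github.com/Doctorgth/avto_veks_prog | veksel.py | create_veksel
-- ===== SOURCE A (Python) =====
-- def find(info,mas):
--     i=-1
--     for j in range(len(mas)):
--         if info==mas[j]:
--             i=j
--             return i
--     return i
--
-- Sev_name=["ифнир","корвус","ксанатос","луций","рейвен","тарон","фанем","шаеда"]
--
-- def create_veksel(slov_all,s_name="ифнир"):
--     side="we"
--     type=["Железо","Дерево","Ткань","Кожа"]
--     s_name=s_name.lower()
--     i=find(s_name,Sev_name)
--     if i!=-1:
--         ret="Векселя для сервера: "+s_name+"\n"
--     else: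
--         ret = "Имя сервера не найдено, Векселя для сервера: " + s_name + "\n"
--     for s in side:
--         if s=="w":
--             ret+="ЗАПАД\n\n"
--         else:
--             ret+="ВОСТОК\n\n"
--         for t in type:
--             ret+=t+"\n\n"
--             for i in slov_all:
--                 if i["res"]==t and i["side"]==s:
--                     ret+=create_stroka(i)+"\n"
--             ret+="\n"
--
--     return ret
--
-- def create_stroka(x):
--     return x["name"]+" "+x["count"]
-- ===== SOURCE B (Python) =====
-- Sev_name=["ифнир","корвус","ксанатос","луций","рейвен","тарон","фанем","шаеда"]
--
-- def create_veksel(slov_all, s_name="ифнир"):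
--     types = ("Железо", "Дерево", "Ткань", "Кожа")
--     buckets = {}
--     for item in slov_all:
--         if item["res"] in types:
--             buckets.setdefault((item["side"], item["res"]), []).append(item)
--     s_name = s_name.lower()
--     if s_name in Sev_name:
--         ret = "Векселя для сервера: " + s_name + "\n"
--     else:
--         ret = "Имя сервера не найдено, Векселя для сервера: " + s_name + "\n"
--     for s, label in (("w", "ЗАПАД"), ("e", "ВОСТОК")):
--         ret += label + "\n\n"
--         for t in types:
--             ret += t + "\n\n"
--             for item in buckets.get((s, t), ()):
--                 ret += item["name"] + " " + item["count"] + "\n"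
--             ret += "\n"
--     return ret
-- ===== Notes on version B (the rewrite author's own statement) =====
-- stated objective: alternative
-- what changed: B replaces A's eight full scans of slov_all (one per side x type combination) by a single bucketing pass into a dict keyed by (side, res) followed by lookup-driven emission over the fixed side/type order.
import Mathlib
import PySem

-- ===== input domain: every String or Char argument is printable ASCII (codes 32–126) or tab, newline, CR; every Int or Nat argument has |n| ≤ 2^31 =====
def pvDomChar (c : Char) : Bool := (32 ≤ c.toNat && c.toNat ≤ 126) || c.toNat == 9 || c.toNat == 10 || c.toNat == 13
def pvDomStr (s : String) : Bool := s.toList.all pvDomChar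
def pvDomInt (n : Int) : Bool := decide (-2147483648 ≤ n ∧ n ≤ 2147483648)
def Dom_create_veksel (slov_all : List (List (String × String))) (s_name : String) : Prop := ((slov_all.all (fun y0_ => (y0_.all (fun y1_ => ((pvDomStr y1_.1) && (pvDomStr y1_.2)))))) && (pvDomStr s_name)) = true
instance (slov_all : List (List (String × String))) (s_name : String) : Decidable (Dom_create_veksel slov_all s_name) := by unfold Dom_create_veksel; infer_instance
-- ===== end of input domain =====

-- B replaces A's eight full scans of slov_all (one scan per side×type pair) by one bucketing
-- pass into a dict keyed by (side, res), then lookup-driven emission in the fixed order.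

-- ===== PORT A =====
-- x[k] for a Python dict (assoc list, first match); total with default "" — Pre_ guarantees presence
def pgetO (x : List (String × String)) (k : String) : Option String :=
  (x.find? (fun p => p.1 == k)).map (fun p => p.2)

def pget (x : List (String × String)) (k : String) : String :=
  (pgetO x k).getD ""

-- find(info, mas): index of first match else -1 (index counter carried as j)
def findAux (info : String) : List String → Int → Int
  | [], _ => -1
  | m :: rest, j => if info == m then j else findAux info rest (j + 1)

def find (info : String) (mas : List String) : Int := findAux info mas 0

def Sev_name : List String :=
  ["ифнир", "корвус", "ксанатос", "луций", "рейвен", "тарон", "фанем", "шаеда"]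

def create_stroka (x : List (String × String)) : String :=
  pget x "name" ++ " " ++ pget x "count"

def veksel_types : List String := ["Железо", "Дерево", "Ткань", "Кожа"]

def create_veksel (slov_all : List (List (String × String))) (s_name : String) : String :=
  let side : String := "we"
  let type := veksel_types
  let s_name := PySem.Str.lower s_name
  let i := find s_name Sev_name
  let ret :=
    if i ≠ -1 then "Векселя для сервера: " ++ s_name ++ "\n"
    else "Имя сервера не найдено, Векселя для сервера: " ++ s_name ++ "\n"
  side.toList.foldl (fun ret s =>
    let ret := ret ++ (if s = 'w' then "ЗАПАД\n\n" else "ВОСТОК\n\n")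
    type.foldl (fun ret t =>
      let ret := ret ++ t ++ "\n\n"
      let ret := slov_all.foldl (fun ret i =>
        if pget i "res" == t && pget i "side" == String.singleton s
        then ret ++ create_stroka i ++ "\n" else ret) ret
      ret ++ "\n") ret) ret

-- ===== PORT B =====
def create_veksel_alt (slov_all : List (List (String × String))) (s_name : String) : String :=
  let types := veksel_types
  -- one bucketing pass: buckets[(side, res)] = items in insertion order (setdefault+append = modify with [] default)
  let buckets : PySem.Dict (String × String) (List (List (String × String))) :=
    slov_all.foldl (fun d item =>
      if pget item "res" ∈ types then
        d.modify (pget item "side", pget item "res") [] (fun l => l ++ [item])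
      else d) PySem.Dict.empty
  let s_name := PySem.Str.lower s_name
  let ret :=
    if Sev_name.contains s_name then "Векселя для сервера: " ++ s_name ++ "\n"
    else "Имя сервера не найдено, Векселя для сервера: " ++ s_name ++ "\n"
  [("w", "ЗАПАД"), ("e", "ВОСТОК")].foldl (fun ret (sl : String × String) =>
    let ret := ret ++ sl.2 ++ "\n\n"
    types.foldl (fun ret t =>
      let ret := ret ++ t ++ "\n\n"
      let ret := (buckets.getD (sl.1, t) []).foldl (fun ret item =>
        ret ++ pget item "name" ++ " " ++ pget item "count" ++ "\n") ret
      ret ++ "\n") ret) ret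

-- ===== PRECONDITION & SPEC =====
-- Pre_ excludes exactly the inputs where Python A raises KeyError: an item without "res";
-- an item whose "res" is one of the four types but has no "side"; such an item whose "side"
-- is "w" or "e" but lacks "name" or "count".
def Pre_create_veksel (slov_all : List (List (String × String))) (s_name : String) : Prop :=
  ∀ item ∈ slov_all, (pgetO item "res").isSome ∧
    (pget item "res" ∈ veksel_types →
      (pgetO item "side").isSome ∧
      ((pget item "side" = "w" ∨ pget item "side" = "e") →
        (pgetO item "name").isSome ∧ (pgetO item "count").isSome))
instance (slov_all : List (List (String × String))) (s_name : String) : Decidable (Pre_create_veksel slov_all s_name) := by unfold Pre_create_veksel; infer_instance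

def pvWitness_create_veksel : (List (List (String × String))) × String :=
  ([[("res", "iron"), ("side", "w")]], "abc")

def Spec_create_veksel (slov_all : List (List (String × String))) (s_name : String) (out : String) : Prop := out = create_veksel_alt slov_all s_name
instance (slov_all : List (List (String × String))) (s_name : String) (out : String) : Decidable (Spec_create_veksel slov_all s_name out) := by unfold Spec_create_veksel; infer_instance

-- ===== CLAIM (what is proved, stated in full; the proofs are below) =====
def Claim_equal_create_veksel : Prop := ∀ (slov_all : List (List (String × String))) (s_name : String), Dom_create_veksel slov_all s_name → Pre_create_veksel slov_all s_name → Spec_create_veksel slov_all s_name (create_veksel slov_all s_name)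


-- ===== LEMMAS AND PROOFS =====

-- find: -1 exactly when absent (index counter stays nonnegative)
theorem findAux_eq_neg_one_iff (info : String) (mas : List String) (j : Int) (hj : 0 ≤ j) :
    (findAux info mas j = -1) ↔ info ∉ mas := by
  induction mas generalizing j with
  | nil => simp [findAux]
  | cons m rest ih =>
    simp only [findAux, List.mem_cons]
    by_cases h : info = m
    · have hb : (info == m) = true := by simp [h]
      simp only [hb, if_true]
      simp [h]
      omega
    · have hb : (info == m) = false := by simp [h]
      simp only [hb, Bool.false_eq_true, if_false]
      rw [ih (j + 1) (by omega)]
      simp [h]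

theorem find_ne_neg_one_iff (info : String) (mas : List String) :
    (find info mas ≠ -1) ↔ mas.contains info = true := by
  unfold find
  rw [ne_eq, findAux_eq_neg_one_iff info mas 0 (by omega)]
  simp

-- the bucket at key (s, t), t a type, is exactly A's filtered sublist, in order
theorem bucket_getD (slov_all : List (List (String × String))) (s t : String)
    (ht : t ∈ (["Железо", "Дерево", "Ткань", "Кожа"] : List String))
    (d : PySem.Dict (String × String) (List (List (String × String)))) :
    (slov_all.foldl (fun d item =>
        if pget item "res" ∈ (["Железо", "Дерево", "Ткань", "Кожа"] : List String) then
          d.modify (pget item "side", pget item "res") [] (fun l => l ++ [item])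
        else d) d).getD (s, t) []
      = d.getD (s, t) []
        ++ slov_all.filter (fun i => pget i "res" == t && pget i "side" == s) := by
  induction slov_all generalizing d with
  | nil => simp
  | cons x xs ih =>
    simp only [List.foldl_cons, List.filter_cons]
    by_cases hres : pget x "res" ∈ (["Железо", "Дерево", "Ткань", "Кожа"] : List String)
    · rw [if_pos hres, ih, PySem.Dict.getD_modify]
      by_cases hkey : ((s, t) : String × String) = (pget x "side", pget x "res")
      · have hs : pget x "side" = s := (congrArg Prod.fst hkey).symm
        have htt : pget x "res" = t := (congrArg Prod.snd hkey).symm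
        have hpred : (pget x "res" == t && pget x "side" == s) = true := by
          simp [hs, htt]
        rw [if_pos hkey, if_pos hpred, hs, htt, List.append_assoc]
        simp
      · have hpred : ¬ ((pget x "res" == t && pget x "side" == s) = true) := by
          intro hc
          simp only [Bool.and_eq_true, beq_iff_eq] at hc
          exact hkey (by simp [hc.1, hc.2])
        rw [if_neg hkey, if_neg hpred]
    · rw [if_neg hres]
      have hpred : ¬ ((pget x "res" == t && pget x "side" == s) = true) := by
        intro hc
        simp only [Bool.and_eq_true, beq_iff_eq] at hc
        exact hres (hc.1 ▸ ht)
      rw [if_neg hpred, ih]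

-- A's conditional-append scan equals a plain append fold over the filtered list
theorem foldl_if_filter {α : Type} (xs : List α) (p : α → Bool) (g : String → α → String)
    (init : String) :
    xs.foldl (fun r i => if p i then g r i else r) init
      = (xs.filter p).foldl g init := by
  induction xs generalizing init with
  | nil => rfl
  | cons x xs ih =>
    simp only [List.foldl_cons, List.filter_cons]
    by_cases h : p x
    · simp [h, ih]
    · simp [h, ih]

-- one side×type block of A equals B's bucket emission
theorem block_eq (slov_all : List (List (String × String))) (s t : String)
    (ht : t ∈ (["Железо", "Дерево", "Ткань", "Кожа"] : List String)) (init : String) :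
    slov_all.foldl (fun ret i =>
        if pget i "res" == t && pget i "side" == s
        then ret ++ create_stroka i ++ "\n" else ret) init
      = ((slov_all.foldl (fun d item =>
            if pget item "res" ∈ (["Железо", "Дерево", "Ткань", "Кожа"] : List String) then
              d.modify (pget item "side", pget item "res") [] (fun l => l ++ [item])
            else d) PySem.Dict.empty).getD (s, t) []).foldl
          (fun ret item => ret ++ pget item "name" ++ " " ++ pget item "count" ++ "\n") init := by
  rw [bucket_getD slov_all s t ht PySem.Dict.empty]
  simp only [PySem.Dict.getD_empty, List.nil_append]
  rw [foldl_if_filter slov_all _ (fun r i => r ++ create_stroka i ++ "\n") init]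
  have hfun : (fun (r : String) i => r ++ create_stroka i ++ "\n")
      = (fun (r : String) item => r ++ pget item "name" ++ " " ++ pget item "count" ++ "\n") := by
    funext r i
    simp [create_stroka, String.append_assoc]
  rw [hfun]

-- ===== VERDICT (by name: the statement is the Claim_ definition above) =====
theorem create_veksel_spec : Claim_equal_create_veksel := by
  intro slov_all s_name _ _
  unfold Spec_create_veksel create_veksel create_veksel_alt
  have hside : ("we" : String).toList = ['w', 'e'] := rfl
  have hW : String.singleton 'w' = "w" := rfl
  have hE : String.singleton 'e' = "e" := rfl
  simp only [hside, veksel_types, List.foldl_cons, List.foldl_nil, hW, hE,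
    find_ne_neg_one_iff, reduceIte]
  rw [block_eq slov_all "w" "Железо" (by decide), block_eq slov_all "w" "Дерево" (by decide),
      block_eq slov_all "w" "Ткань" (by decide), block_eq slov_all "w" "Кожа" (by decide),
      block_eq slov_all "e" "Железо" (by decide), block_eq slov_all "e" "Дерево" (by decide),
      block_eq slov_all "e" "Ткань" (by decide), block_eq slov_all "e" "Кожа" (by decide)]
  have hCe : (if ('e' : Char) = 'w' then ("ЗАПАД\n\n" : String) else "ВОСТОК\n\n") = "ВОСТОК\n\n" := if_neg (by decide)
  have hZ : ("ЗАПАД" : String) ++ "\n\n" = "ЗАПАД\n\n" := rfl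
  have hV : ("ВОСТОК" : String) ++ "\n\n" = "ВОСТОК\n\n" := rfl
  simp only [hCe, String.append_assoc, hZ, hV]
  exact rfl
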